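-- pv_equiv track=rewrite | github.com/krazyfool007/site_generator | src/block_markdown.py | markdown_to_blocks
-- ===== SOURCE A (Python) =====
-- def markdown_to_blocks(markdown: str) -> list:
--     # Initialized the blocks list with a starting value to avoid IndexError
--     blocks = [""]
--
--     # Loop through the raw markdown text line by line
--     for line in markdown.split("\n"):
--
--         # If you encounter a blank value it was an empty line and must be skipped
--         if line == "":
--
--             # New block added, starting value of "" to allow us to add an f-string to it.
--             blocks.append("")
--             continue
--
--         # Using -1 ensures that we are always appending to the most recent block
--         blocks[-1] += f"{line}\n"
--
--         # Remove all whitespace from blocks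
--     blocks = [block.strip() for block in blocks if block.strip() != ""]
--
--     return blocks
-- ===== SOURCE B (Python) =====
-- def markdown_to_blocks(markdown: str) -> list:
--     # Split once on the blank-line separator; strip each chunk and drop empties.
--     return [block.strip() for block in markdown.split("\n\n") if block.strip()]
-- ===== Notes on version B (the rewrite author's own statement) =====
-- stated objective: idiomatic
-- what changed: B splits the whole text once on the blank-line separator (two consecutive newlines) and strips/filters the resulting chunks, instead of iterating line by line while accumulating lines into a growing blocks[-1] and appending a fresh block at every empty line.
import Mathlib
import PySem

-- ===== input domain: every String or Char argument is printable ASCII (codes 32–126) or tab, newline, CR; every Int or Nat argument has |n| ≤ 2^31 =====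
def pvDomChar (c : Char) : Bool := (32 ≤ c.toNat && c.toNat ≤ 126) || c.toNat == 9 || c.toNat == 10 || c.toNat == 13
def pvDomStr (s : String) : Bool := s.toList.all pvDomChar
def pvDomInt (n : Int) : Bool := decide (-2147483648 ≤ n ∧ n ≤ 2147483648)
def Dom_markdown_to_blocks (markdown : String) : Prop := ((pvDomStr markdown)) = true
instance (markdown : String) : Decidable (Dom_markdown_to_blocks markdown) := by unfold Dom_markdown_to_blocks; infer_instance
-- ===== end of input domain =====

-- B replaces A's line-by-line accumulation into blocks[-1] by a single split on "\n\n" (idiomatic; same result).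

-- ===== PORT A =====
-- the loop body: empty line appends a fresh block, otherwise blocks[-1] += line + "\n"
def mtbStep (blocks : List (List Char)) (line : List Char) : List (List Char) :=
  if line = [] then blocks ++ [[]]
  else blocks.dropLast ++ [blocks.getLastD [] ++ line ++ ['\n']]

def markdown_to_blocks (markdown : String) : List String :=
  (((List.foldl mtbStep [[]] (PySem.Chars.splitOn markdown.toList ['\n'])).map
      PySem.Chars.strip).filter (fun b => decide (b ≠ []))).map String.ofList

-- ===== PORT B =====
def markdown_to_blocks_alt (markdown : String) : List String :=
  (((PySem.Chars.splitOn markdown.toList ['\n', '\n']).map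
      PySem.Chars.strip).filter (fun b => decide (b ≠ []))).map String.ofList

-- ===== PRECONDITION & SPEC =====
def Spec_markdown_to_blocks (markdown : String) (out : List String) : Prop := out = markdown_to_blocks_alt markdown
instance (markdown : String) (out : List String) : Decidable (Spec_markdown_to_blocks markdown out) := by unfold Spec_markdown_to_blocks; infer_instance

-- ===== CLAIM (what is proved, stated in full; the proofs are below) =====
def Claim_equal_markdown_to_blocks : Prop := ∀ (markdown : String), Dom_markdown_to_blocks markdown → Spec_markdown_to_blocks markdown (markdown_to_blocks markdown)

-- ===== LEMMAS AND PROOFS =====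

-- a fuel-free reformulation of PySem.Chars.splitOn (for nonempty separators)
def msplit (sep : List Char) : List Char → List Char → List (List Char)
  | [], cur => [cur.reverse]
  | c :: rest, cur =>
    if sep.isPrefixOf (c :: rest) then
      cur.reverse :: msplit sep (rest.drop (sep.length - 1)) []
    else
      msplit sep rest (c :: cur)
termination_by l _ => l.length
decreasing_by
  all_goals simp [List.length_drop]

lemma go_eq (sep : List Char) (hsep : sep ≠ []) :
    ∀ (fuel : Nat) (l cur : List Char) (acc : List (List Char)), l.length < fuel →
      PySem.Chars.splitOn.go sep fuel l cur acc = acc.reverse ++ msplit sep l cur := by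
  intro fuel
  induction fuel with
  | zero => intro l cur acc h; omega
  | succ n ih =>
    intro l cur acc h
    cases l with
    | nil =>
      rw [msplit]
      simp [PySem.Chars.splitOn.go]
    | cons c rest =>
      by_cases hp : sep.isPrefixOf (c :: rest)
      · obtain ⟨a, as, rfl⟩ : ∃ a as, sep = a :: as := by
          cases sep with
          | nil => exact absurd rfl hsep
          | cons a as => exact ⟨a, as, rfl⟩
        rw [show PySem.Chars.splitOn.go (a :: as) (n+1) (c :: rest) cur acc =
              PySem.Chars.splitOn.go (a :: as) n (List.drop (a :: as).length (c :: rest)) []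
                (cur.reverse :: acc) by simp [PySem.Chars.splitOn.go, hp]]
        rw [msplit]
        rw [if_pos hp]
        have hdrop : List.drop (a :: as).length (c :: rest) = rest.drop ((a :: as).length - 1) := by
          simp
        rw [hdrop]
        rw [ih _ _ _ (by simp at h; simp [List.length_drop]; omega)]
        simp
      · rw [show PySem.Chars.splitOn.go sep (n+1) (c :: rest) cur acc =
              PySem.Chars.splitOn.go sep n rest (c :: cur) acc by
            simp [PySem.Chars.splitOn.go, hp]]
        rw [msplit, if_neg hp]
        exact ih _ _ _ (by simp at h ⊢; omega)

lemma splitOn_eq_msplit (s sep : List Char) (h : sep ≠ []) :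
    PySem.Chars.splitOn s sep = msplit sep s [] := by
  unfold PySem.Chars.splitOn
  rw [go_eq sep h (s.length + 1) s [] [] (by omega)]
  simp

-- specialised recursion equations
lemma msplit1_nil (cur : List Char) : msplit ['\n'] [] cur = [cur.reverse] := by rw [msplit]

lemma msplit1_nl (rest cur : List Char) :
    msplit ['\n'] ('\n' :: rest) cur = cur.reverse :: msplit ['\n'] rest [] := by
  rw [msplit]; simp [List.isPrefixOf]

lemma msplit1_cons (c : Char) (rest cur : List Char) (hc : c ≠ '\n') :
    msplit ['\n'] (c :: rest) cur = msplit ['\n'] rest (c :: cur) := by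
  rw [msplit, if_neg (by simp [List.isPrefixOf]; exact fun h => hc h.symm)]

lemma msplit2_nil (cur : List Char) : msplit ['\n', '\n'] [] cur = [cur.reverse] := by rw [msplit]

lemma msplit2_nlnl (rest cur : List Char) :
    msplit ['\n', '\n'] ('\n' :: '\n' :: rest) cur = cur.reverse :: msplit ['\n', '\n'] rest [] := by
  rw [msplit]; simp [List.isPrefixOf]

lemma msplit2_cons_ne (c : Char) (rest cur : List Char) (hc : c ≠ '\n') :
    msplit ['\n', '\n'] (c :: rest) cur = msplit ['\n', '\n'] rest (c :: cur) := by
  rw [msplit, if_neg (by simp [List.isPrefixOf]; exact fun h _ => hc h.symm)]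

lemma msplit2_nl_ne (c : Char) (rest cur : List Char) (hc : c ≠ '\n') :
    msplit ['\n', '\n'] ('\n' :: c :: rest) cur = msplit ['\n', '\n'] (c :: rest) ('\n' :: cur) := by
  rw [msplit, if_neg (by simp [List.isPrefixOf]; exact fun h => hc h.symm)]

lemma msplit2_single (cur : List Char) : msplit ['\n', '\n'] ['\n'] cur = [('\n' :: cur).reverse] := by
  rw [msplit, if_neg (by decide), msplit]

-- strip facts
lemma lstrip_ws_append (w x : List Char) (hw : w.all PySem.Chars.isspace = true) :
    PySem.Chars.lstrip (w ++ x) = PySem.Chars.lstrip x := by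
  have hd : w.dropWhile PySem.Chars.isspace = [] :=
    List.dropWhile_eq_nil_iff.mpr (fun a ha => List.all_eq_true.mp hw a ha)
  simp [PySem.Chars.lstrip, List.dropWhile_append, hd]

lemma strip_ws_append (w x : List Char) (hw : w.all PySem.Chars.isspace = true) :
    PySem.Chars.strip (w ++ x) = PySem.Chars.strip x := by
  simp [PySem.Chars.strip, lstrip_ws_append w x hw]

lemma strip_ws (w : List Char) (hw : w.all PySem.Chars.isspace = true) :
    PySem.Chars.strip w = [] := by
  have := strip_ws_append w [] hw
  simpa using this

lemma rstrip_append_nl (x : List Char) :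
    PySem.Chars.rstrip (x ++ ['\n']) = PySem.Chars.rstrip x := by
  simp [PySem.Chars.rstrip, show PySem.Chars.isspace '\n' = true by decide]

lemma strip_append_nl (x : List Char) :
    PySem.Chars.strip (x ++ ['\n']) = PySem.Chars.strip x := by
  by_cases h : x.dropWhile PySem.Chars.isspace = []
  · have h2 : List.dropWhile PySem.Chars.isspace ['\n'] = [] := by decide
    simp [PySem.Chars.strip, PySem.Chars.lstrip, List.dropWhile_append, h, h2, PySem.Chars.rstrip]
  · simp [PySem.Chars.strip, PySem.Chars.lstrip, List.dropWhile_append, h]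
    exact rstrip_append_nl _

-- the strip-and-filter postprocessing shared by both programs
def postf (xs : List (List Char)) : List (List Char) :=
  (xs.map PySem.Chars.strip).filter (fun b => decide (b ≠ []))

lemma postf_append (xs ys : List (List Char)) : postf (xs ++ ys) = postf xs ++ postf ys := by
  simp [postf]

lemma postf_cons' (y : List Char) (ys : List (List Char)) :
    postf (y :: ys) = postf [y] ++ postf ys := by
  by_cases h : PySem.Chars.strip y = [] <;> simp [postf, h]

lemma postf_single_nil : postf [([] : List Char)] = [] := by decide

lemma postf_single_append_nl (x : List Char) : postf [x ++ ['\n']] = postf [x] := by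
  simp [postf, strip_append_nl]

-- A's fold only touches the last block; finished blocks pass straight through
lemma foldl_step_append (lines : List (List Char)) :
    ∀ (blocks : List (List Char)) (L : List Char),
      postf (List.foldl mtbStep (blocks ++ [L]) lines) =
        postf blocks ++ postf (List.foldl mtbStep [L] lines) := by
  induction lines with
  | nil => intro blocks L; simp [postf_append]
  | cons line tail ih =>
    intro blocks L
    by_cases h : line = []
    · subst h
      simp only [List.foldl_cons]
      have e1 : mtbStep (blocks ++ [L]) [] = (blocks ++ [L]) ++ [[]] := by simp [mtbStep]
      have e2 : mtbStep [L] [] = [L] ++ [[]] := by simp [mtbStep]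
      rw [e1, e2, ih (blocks ++ [L]) [], ih [L] [], postf_append, List.append_assoc]
    · simp only [List.foldl_cons]
      have e1 : mtbStep (blocks ++ [L]) line = blocks ++ [L ++ line ++ ['\n']] := by
        simp [mtbStep, h]
      have e2 : mtbStep [L] line = [L ++ line ++ ['\n']] := by simp [mtbStep, h]
      rw [e1, e2, ih]

-- flushing the pending block/chunk gives the same stripped output
lemma flush_eq {L cur cur2 w : List Char} (hw : w.all PySem.Chars.isspace = true)
    (hcl : cur = [] → L = []) (hc2 : cur2.reverse = w ++ L ++ cur.reverse) :
    postf (mtbStep [L] cur.reverse) = postf [cur2.reverse] := by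
  by_cases hcur : cur = []
  · have hL := hcl hcur
    subst hL; subst hcur
    have hw2 : cur2.reverse = w := by simpa using hc2
    rw [hw2]
    have h1 : mtbStep [([] : List Char)] [].reverse = [[], []] := by simp [mtbStep]
    rw [h1]
    have h2 : PySem.Chars.strip w = [] := strip_ws w hw
    simp [postf, h2, show PySem.Chars.strip [] = [] by decide]
  · have hne : cur.reverse ≠ [] := by simpa using hcur
    have h1 : mtbStep [L] cur.reverse = [L ++ cur.reverse ++ ['\n']] := by simp [mtbStep, hne]
    rw [h1, hc2, postf_single_append_nl]
    have h2 : PySem.Chars.strip (w ++ (L ++ cur.reverse)) = PySem.Chars.strip (L ++ cur.reverse) :=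
      strip_ws_append w _ hw
    simp [postf, h2]

-- the main invariant: A's fold over "\n"-lines and B's "\n\n"-chunks flush equal stripped blocks
lemma main_lemma : ∀ (n : Nat) (s : List Char), s.length ≤ n →
    ∀ (L cur cur2 w : List Char),
      w.all PySem.Chars.isspace = true → (cur = [] → L = []) →
      cur2.reverse = w ++ L ++ cur.reverse →
      postf (List.foldl mtbStep [L] (msplit ['\n'] s cur)) = postf (msplit ['\n', '\n'] s cur2) := by
  intro n
  induction n with
  | zero =>
    intro s hs L cur cur2 w hw hcl hc2
    have hsnil : s = [] := List.eq_nil_of_length_eq_zero (Nat.le_zero.mp hs)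
    subst hsnil
    rw [msplit1_nil, msplit2_nil]
    simpa only [List.foldl_cons, List.foldl_nil] using flush_eq hw hcl hc2
  | succ n ih =>
    intro s hs L cur cur2 w hw hcl hc2
    rcases s with _ | ⟨c1, s1⟩
    · rw [msplit1_nil, msplit2_nil]
      simpa only [List.foldl_cons, List.foldl_nil] using flush_eq hw hcl hc2
    by_cases h1 : c1 = '\n'
    · subst h1
      rcases s1 with _ | ⟨c2, rest⟩
      · -- s = ['\n']
        rw [msplit1_nl, msplit1_nil, msplit2_single]
        simp only [List.reverse_nil, List.foldl_cons, List.foldl_nil]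
        have e : mtbStep (mtbStep [L] cur.reverse) [] = mtbStep [L] cur.reverse ++ [[]] := by
          simp [mtbStep]
        rw [e, postf_append, postf_single_nil, List.append_nil, List.reverse_cons,
          postf_single_append_nl]
        exact flush_eq hw hcl hc2
      by_cases h2 : c2 = '\n'
      · -- s = '\n' :: '\n' :: rest
        subst h2
        rw [msplit1_nl, msplit1_nl]
        simp only [List.reverse_nil, List.foldl_cons]
        have e : mtbStep (mtbStep [L] cur.reverse) [] = mtbStep [L] cur.reverse ++ [[]] := by
          simp [mtbStep]
        rw [e, foldl_step_append, msplit2_nlnl, postf_cons', flush_eq hw hcl hc2]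
        congr 1
        exact ih rest (by simp at hs; omega) [] [] [] [] (by decide) (fun _ => rfl) (by simp)
      · -- s = '\n' :: c2 :: rest, c2 ≠ '\n'
        rw [msplit1_nl, msplit1_cons c2 rest [] h2, msplit2_nl_ne c2 rest cur2 h2,
          msplit2_cons_ne c2 rest ('\n' :: cur2) h2]
        simp only [List.foldl_cons]
        by_cases hcur : cur = []
        · have hL := hcl hcur
          subst hL; subst hcur
          have hw2 : cur2.reverse = w := by simpa using hc2
          have e : mtbStep [([] : List Char)] [].reverse = [[]] ++ [[]] := by simp [mtbStep]
          rw [e, foldl_step_append, postf_single_nil, List.nil_append]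
          refine ih rest (by simp at hs; omega) [] [c2] (c2 :: '\n' :: cur2) (w ++ ['\n'])
            ?_ (by simp) ?_
          · simp [List.all_append, hw]; decide
          · simp [hw2]
        · have hne : cur.reverse ≠ [] := by simpa using hcur
          have e : mtbStep [L] cur.reverse = [L ++ cur.reverse ++ ['\n']] := by
            simp [mtbStep, hne]
          rw [e]
          refine ih rest (by simp at hs; omega) (L ++ cur.reverse ++ ['\n']) [c2]
            (c2 :: '\n' :: cur2) w hw (by simp) ?_
          simp [hc2]
    · -- s = c1 :: s1, c1 ≠ '\n'
      rw [msplit1_cons c1 s1 cur h1, msplit2_cons_ne c1 s1 cur2 h1]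
      refine ih s1 (by simp at hs; omega) L (c1 :: cur) (c1 :: cur2) w hw (by simp) ?_
      simp [hc2]

-- ===== VERDICT (by name: the statement is the Claim_ definition above) =====
theorem markdown_to_blocks_spec : Claim_equal_markdown_to_blocks := by
  unfold Claim_equal_markdown_to_blocks
  intro md _
  unfold Spec_markdown_to_blocks markdown_to_blocks markdown_to_blocks_alt
  rw [splitOn_eq_msplit md.toList ['\n'] (by decide),
    splitOn_eq_msplit md.toList ['\n', '\n'] (by decide)]
  have h := main_lemma md.toList.length md.toList le_rfl [] [] [] [] (by decide)
    (fun _ => rfl) (by simp)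
  have e : ∀ xs : List (List Char),
      (xs.map PySem.Chars.strip).filter (fun b => decide (b ≠ [])) = postf xs := fun _ => rfl
  rw [e, e, h]
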